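-- pv_equiv track=rewrite | github.com/ga0808/algorithm | 프로그래머스/lv1/42840. 모의고사/모의고사.py | solution
-- ===== SOURCE A (Python) =====
-- def solution(answers):
--     answer = []
--     res = { 1: 0, 2:0, 3:0}
--     one = [1, 2, 3, 4, 5]
--     two = [2, 1, 2, 3, 2, 4, 2, 5]
--     three = [3, 3, 1, 1, 2, 2, 4, 4, 5, 5]
--
--     for a in range(len(answers)):
--         if answers[a] == one[a%len(one)]:
--             res[1] +=1
--         if answers[a] == two[a%len(two)]:
--             res[2] +=1
--         if answers[a] == three[a%len(three)]:
--             res[3] +=1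
--     answer = [k for k,v in res.items() if max(res.values()) == v]
--     return answer
-- ===== SOURCE B (Python) =====
-- def solution(answers):
--     # Histogram of (position mod 40, given answer); 40 = lcm of the pattern
--     # lengths 5, 8, 10, so a position's residue mod 40 determines what every
--     # pattern guesses there.  Scores are then 40 table lookups per pattern,
--     # with no comparison of answers against patterns at all.
--     freq = {}
--     for i, a in enumerate(answers):
--         key = (i % 40, a)
--         freq[key] = freq.get(key, 0) + 1
--     pats = [[1, 2, 3, 4, 5],
--             [2, 1, 2, 3, 2, 4, 2, 5],
--             [3, 3, 1, 1, 2, 2, 4, 4, 5, 5]]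
--     scores = [sum(freq.get((r, p[r % len(p)]), 0) for r in range(40))
--               for p in pats]
--     best = max(scores)
--     return [i + 1 for i in range(3) if scores[i] == best]
-- ===== Notes on version B (the rewrite author's own statement) =====
-- stated objective: alternative
-- what changed: Instead of comparing each answer against the three cyclic patterns (A's fused counter loop), B builds a (position mod 40, answer) frequency table in one pass -- 40 = lcm of the pattern lengths -- and computes each pattern's score as 40 table lookups, never comparing answers to patterns directly.
import Mathlib
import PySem

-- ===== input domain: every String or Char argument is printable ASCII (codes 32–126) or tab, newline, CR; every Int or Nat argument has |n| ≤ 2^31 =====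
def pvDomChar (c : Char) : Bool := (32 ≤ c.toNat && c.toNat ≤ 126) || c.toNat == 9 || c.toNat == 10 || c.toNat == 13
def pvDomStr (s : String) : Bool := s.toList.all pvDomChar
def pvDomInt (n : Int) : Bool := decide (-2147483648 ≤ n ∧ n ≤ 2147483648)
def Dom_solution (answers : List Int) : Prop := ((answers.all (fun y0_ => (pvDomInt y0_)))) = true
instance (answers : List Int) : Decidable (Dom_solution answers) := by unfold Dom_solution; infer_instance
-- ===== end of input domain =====

-- B replaces A's per-answer comparison against the three cyclic patterns by a
-- (position mod 40, answer) frequency table (40 = lcm of the pattern lengths)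
-- from which each pattern's score is 40 lookups (objective: alternative).

-- ===== PORT A =====
def solution (answers : List Int) : List Int :=
  let one : List Int := [1, 2, 3, 4, 5]
  let two : List Int := [2, 1, 2, 3, 2, 4, 2, 5]
  let three : List Int := [3, 3, 1, 1, 2, 2, 4, 4, 5, 5]
  let res : PySem.Dict Int Int := PySem.Dict.ofList [(1, 0), (2, 0), (3, 0)]
  let res := (PySem.List.pyRange 0 (answers.length : Int) 1).foldl (fun r a =>
    let r := if PySem.List.pyGetD answers a 0 == PySem.List.pyGetD one (PySem.Int.mod a (one.length : Int)) 0
             then r.modify 1 0 (· + 1) else r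
    let r := if PySem.List.pyGetD answers a 0 == PySem.List.pyGetD two (PySem.Int.mod a (two.length : Int)) 0
             then r.modify 2 0 (· + 1) else r
    if PySem.List.pyGetD answers a 0 == PySem.List.pyGetD three (PySem.Int.mod a (three.length : Int)) 0
    then r.modify 3 0 (· + 1) else r) res
  res.items.foldl (fun acc kv =>
    if (PySem.List.max? res.values (fun y => y)).getD 0 == kv.2 then acc ++ [kv.1] else acc) []

-- ===== PORT B =====
-- freq[key] = freq.get(key, 0) + 1  →  Dict.modify key 0 (· + 1)
def solution_alt (answers : List Int) : List Int :=
  let freq : PySem.Dict (Int × Int) Int :=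
    (PySem.List.enumerate answers 0).foldl
      (fun d ia => d.modify (PySem.Int.mod ia.1 40, ia.2) 0 (· + 1)) (PySem.Dict.mk [])
  let pats : List (List Int) :=
    [[1, 2, 3, 4, 5], [2, 1, 2, 3, 2, 4, 2, 5], [3, 3, 1, 1, 2, 2, 4, 4, 5, 5]]
  let scores := pats.map (fun p =>
    (PySem.List.pyRange 0 40 1).foldl
      (fun s r => s + freq.getD (r, PySem.List.pyGetD p (PySem.Int.mod r (p.length : Int)) 0) 0) 0)
  let best := (PySem.List.max? scores (fun y => y)).getD 0
  (PySem.List.pyRange 0 3 1).foldl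
    (fun acc i => if PySem.List.pyGetD scores i 0 == best then acc ++ [i + 1] else acc) []

-- ===== PRECONDITION & SPEC =====
def Spec_solution (answers : List Int) (out : List Int) : Prop := out = solution_alt answers
instance (answers : List Int) (out : List Int) : Decidable (Spec_solution answers out) := by unfold Spec_solution; infer_instance

-- ===== CLAIM =====
def Claim_equal_solution : Prop := ∀ (answers : List Int), Dom_solution answers → Spec_solution answers (solution answers)

-- ===== LEMMAS AND PROOFS =====

-- The body of A's loop, as a function of the dict, the index and the element answers[index].
def pvStep (r : PySem.Dict Int Int) (j v : Int) : PySem.Dict Int Int :=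
  let r := if v == PySem.List.pyGetD ([1, 2, 3, 4, 5] : List Int) (PySem.Int.mod j (([1, 2, 3, 4, 5] : List Int).length : Int)) 0
           then r.modify 1 0 (· + 1) else r
  let r := if v == PySem.List.pyGetD ([2, 1, 2, 3, 2, 4, 2, 5] : List Int) (PySem.Int.mod j (([2, 1, 2, 3, 2, 4, 2, 5] : List Int).length : Int)) 0
           then r.modify 2 0 (· + 1) else r
  if v == PySem.List.pyGetD ([3, 3, 1, 1, 2, 2, 4, 4, 5, 5] : List Int) (PySem.Int.mod j (([3, 3, 1, 1, 2, 2, 4, 4, 5, 5] : List Int).length : Int)) 0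
  then r.modify 3 0 (· + 1) else r

-- "index-element pair (i, a) matches pattern p at its cycled position"
def pvHit (p : List Int) (ia : Int × Int) : Bool :=
  ia.2 == PySem.List.pyGetD p (PySem.Int.mod ia.1 (p.length : Int)) 0

-- B's histogram key of an (index, answer) pair
def pvKey (ia : Int × Int) : Int × Int := (PySem.Int.mod ia.1 40, ia.2)

-- A fold over range(len(xs)) whose body reads xs[j] at the loop index j IS the fold over enumerate(xs).
theorem pv_range_fold_enumerate {β : Type} (F : β → Int → Int → β) :
    ∀ (suf pre : List Int) (init : β),
      (PySem.List.pyRange (pre.length : Int) ((pre.length : Int) + (suf.length : Int)) 1).foldl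
        (fun acc j => F acc j (PySem.List.pyGetD (pre ++ suf) j 0)) init
      = (PySem.List.enumerate suf (pre.length : Int)).foldl (fun acc ia => F acc ia.1 ia.2) init := by
  intro suf
  induction suf with
  | nil => intro pre init; simp [PySem.List.pyRange_one_eq_nil, PySem.List.enumerate]
  | cons a t ih =>
    intro pre init
    have hab : (pre.length : Int) < (pre.length : Int) + ((a :: t).length : Int) := by
      simp only [List.length_cons]; push_cast; omega
    rw [PySem.List.pyRange_one_cons hab]
    simp only [List.foldl_cons, PySem.List.enumerate_cons]
    rw [show PySem.List.pyGetD (pre ++ a :: t) (pre.length : Int) 0 = a by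
      simp [PySem.List.pyGetD_natCast, List.getD]]
    have h := ih (pre ++ [a]) (F init (pre.length : Int) a)
    simp only [List.append_assoc, List.cons_append, List.nil_append, List.length_append,
      List.length_cons, List.length_nil] at h
    push_cast at h ⊢
    convert h using 3 <;> · simp only [List.length_cons]; push_cast; omega

-- A's dict-update loop, run over any index/element list, adds each pattern's hit count to its counter.
theorem pv_dict_fold (l : List (Int × Int)) :
    ∀ (v1 v2 v3 : Int),
      l.foldl (fun r ia => pvStep r ia.1 ia.2) (PySem.Dict.mk [(1, v1), (2, v2), (3, v3)])
      = PySem.Dict.mk [(1, v1 + (l.countP (pvHit [1, 2, 3, 4, 5]) : Int)),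
                       (2, v2 + (l.countP (pvHit [2, 1, 2, 3, 2, 4, 2, 5]) : Int)),
                       (3, v3 + (l.countP (pvHit [3, 3, 1, 1, 2, 2, 4, 4, 5, 5]) : Int))] := by
  induction l with
  | nil => intro v1 v2 v3; simp
  | cons ia t ih =>
    intro v1 v2 v3
    simp only [List.foldl_cons, List.countP_cons]
    rw [show pvStep (PySem.Dict.mk [(1, v1), (2, v2), (3, v3)]) ia.1 ia.2
        = PySem.Dict.mk [(1, v1 + if pvHit [1, 2, 3, 4, 5] ia then 1 else 0),
                         (2, v2 + if pvHit [2, 1, 2, 3, 2, 4, 2, 5] ia then 1 else 0),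
                         (3, v3 + if pvHit [3, 3, 1, 1, 2, 2, 4, 4, 5, 5] ia then 1 else 0)] from by
      simp only [pvStep, pvHit]
      split_ifs <;>
        simp_all [PySem.Dict.modify, PySem.Dict.insert, PySem.Dict.getD, PySem.Dict.get?]]
    rw [ih]
    by_cases h1 : pvHit [1, 2, 3, 4, 5] ia <;>
    by_cases h2 : pvHit [2, 1, 2, 3, 2, 4, 2, 5] ia <;>
    by_cases h3 : pvHit [3, 3, 1, 1, 2, 2, 4, 4, 5, 5] ia <;>
      simp [h1, h2, h3] <;> ring_nf <;> simp

-- mod 40 then mod L = mod L when L divides 40 (Python floor mod, positive divisors)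
theorem pv_modmod (i L : Int) (hL : 0 < L) (hd : L ∣ 40) :
    PySem.Int.mod (PySem.Int.mod i 40) L = PySem.Int.mod i L := by
  rw [PySem.Int.mod_eq_emod_of_pos hL, PySem.Int.mod_eq_emod_of_pos hL,
    PySem.Int.mod_eq_emod_of_pos (by norm_num : (0:Int) < 40)]
  exact Int.emod_emod_of_dvd i hd

-- a sum over range n of a function vanishing away from m < n is its value at m
theorem pv_sum_single (g : Nat → Nat) :
    ∀ (n m : Nat), m < n → (∀ r, r ≠ m → g r = 0) → ((List.range n).map g).sum = g m := by
  intro n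
  induction n with
  | zero => intro m hm; omega
  | succ k ih =>
    intro m hm h0
    rw [List.range_succ]
    by_cases hmk : m = k
    · subst hmk
      have : ((List.range m).map g).sum = 0 := by
        apply List.sum_eq_zero; intro x hx
        simp only [List.mem_map, List.mem_range] at hx
        obtain ⟨r, hr, rfl⟩ := hx; exact h0 r (by omega)
      simp [this]
    · rw [List.map_append, List.sum_append]
      simp [ih m (by omega) h0, h0 k (by omega)]

-- one pair contributes to exactly one of the 40 histogram cells of pattern p,
-- and it is the hit cell
theorem pv_spike (p : List Int) (hL : 0 < (p.length : Int)) (hd : (p.length : Int) ∣ 40)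
    (ia : Int × Int) :
    ((List.range 40).map (fun (r : Nat) =>
      if pvKey ia == ((r : Int), PySem.List.pyGetD p (PySem.Int.mod (r : Int) (p.length : Int)) 0)
      then 1 else 0)).sum = (if pvHit p ia then 1 else 0 : Nat) := by
  have h40 : (0:Int) < 40 := by norm_num
  have hnn := PySem.Int.mod_nonneg ia.1 h40
  have hlt := PySem.Int.mod_lt ia.1 h40
  set m : Nat := (PySem.Int.mod ia.1 40).toNat with hm
  have hmi : (m : Int) = PySem.Int.mod ia.1 40 := Int.toNat_of_nonneg hnn
  have hmlt : m < 40 := by omega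
  rw [pv_sum_single _ 40 m hmlt]
  · simp only [pvKey, beq_iff_eq, Prod.ext_iff, hmi]
    rw [pv_modmod ia.1 _ hL hd]
    unfold pvHit
    by_cases h : ia.2 = PySem.List.pyGetD p (PySem.Int.mod ia.1 (p.length : Int)) 0 <;>
      simp [h]
  · intro r hr
    simp only [pvKey, beq_iff_eq, Prod.ext_iff, ite_eq_right_iff, and_imp]
    intro h1 _
    rw [← hmi] at h1
    have hrm : m = r := by exact_mod_cast h1
    exact absurd hrm.symm hr

-- the 40-cell sum of the histogram counts of any key list equals the hit count
theorem pv_sum_count (p : List Int) (hL : 0 < (p.length : Int)) (hd : (p.length : Int) ∣ 40) :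
    ∀ (l : List (Int × Int)),
      ((List.range 40).map (fun (r : Nat) =>
        (l.map pvKey).count ((r : Int), PySem.List.pyGetD p (PySem.Int.mod (r : Int) (p.length : Int)) 0))).sum
      = l.countP (pvHit p) := by
  intro l
  induction l with
  | nil => simp
  | cons ia t ih =>
    simp only [List.map_cons, List.count_cons, List.countP_cons]
    rw [show ((List.range 40).map (fun (r : Nat) =>
        ((t.map pvKey).count ((r : Int), PySem.List.pyGetD p (PySem.Int.mod (r : Int) (p.length : Int)) 0))
        + if pvKey ia == ((r : Int), PySem.List.pyGetD p (PySem.Int.mod (r : Int) (p.length : Int)) 0) then 1 else 0)).sum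
      = ((List.range 40).map (fun (r : Nat) =>
          (t.map pvKey).count ((r : Int), PySem.List.pyGetD p (PySem.Int.mod (r : Int) (p.length : Int)) 0))).sum
        + ((List.range 40).map (fun (r : Nat) =>
          if pvKey ia == ((r : Int), PySem.List.pyGetD p (PySem.Int.mod (r : Int) (p.length : Int)) 0) then 1 else 0)).sum from by
        rw [← List.sum_map_add]]
    rw [ih, pv_spike p hL hd ia]

-- The two final selection loops agree once the three counts agree.
theorem pv_select (c1 c2 c3 m : Int) :
    ([(1, c1), (2, c2), (3, c3)] : List (Int × Int)).foldl
      (fun acc kv => if m == kv.2 then acc ++ [kv.1] else acc) []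
    = (PySem.List.pyRange 0 3 1).foldl
      (fun i_1 i => if PySem.List.pyGetD [c1, c2, c3] i 0 == m then i_1 ++ [i + 1] else i_1) [] := by
  have : PySem.List.pyRange 0 3 1 = [0, 1, 2] := by decide
  rw [this]
  simp only [List.foldl_cons, List.foldl_nil, PySem.List.pyGetD_ofNat', List.getD, beq_iff_eq]
  by_cases h1 : c1 = m <;> by_cases h2 : c2 = m <;> by_cases h3 : c3 = m <;>
    simp [h1, h2, h3, eq_comm]

-- B's score fold for pattern p equals the integer hit count of pattern p
theorem pv_score_eq (p : List Int) (hL : 0 < (p.length : Int)) (hd : (p.length : Int) ∣ 40)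
    (answers : List Int) :
    (PySem.List.pyRange 0 40 1).foldl
      (fun s r => s + ((PySem.List.enumerate answers 0).foldl
          (fun d ia => d.modify (PySem.Int.mod ia.1 40, ia.2) 0 (· + 1)) (PySem.Dict.mk [])).getD
            (r, PySem.List.pyGetD p (PySem.Int.mod r (p.length : Int)) 0) 0) 0
    = ((PySem.List.enumerate answers 0).countP (pvHit p) : Int) := by
  have hfold : (PySem.List.enumerate answers 0).foldl
      (fun d ia => d.modify (PySem.Int.mod ia.1 40, ia.2) 0 (· + 1)) (PySem.Dict.mk ([] : List ((Int × Int) × Int)))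
      = ((PySem.List.enumerate answers 0).map pvKey).foldl
          (fun d x => d.modify x 0 (· + 1)) (PySem.Dict.mk []) := by
    rw [List.foldl_map]; rfl
  rw [hfold]
  rw [show ((40 : Int)) = ((40 : Nat) : Int) from rfl, PySem.List.pyRange_zero_nat,
    List.foldl_map, PySem.List.foldl_add]
  simp only [PySem.Dict.getD_foldl_modify_add_one]
  simp only [show ∀ k, (PySem.Dict.mk ([] : List ((Int × Int) × Int))).getD k 0 = 0 from fun _ => rfl,
    zero_add]
  rw [show ((List.range 40).map (fun (r : Nat) => ((((PySem.List.enumerate answers 0).map pvKey).count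
        ((r : Int), PySem.List.pyGetD p (PySem.Int.mod (r : Int) (p.length : Int)) 0) : Nat) : Int))).sum
      = (((List.range 40).map (fun (r : Nat) => ((PySem.List.enumerate answers 0).map pvKey).count
        ((r : Int), PySem.List.pyGetD p (PySem.Int.mod (r : Int) (p.length : Int)) 0))).sum : Int) from by
    rw [Nat.cast_list_sum, List.map_map]; rfl]
  rw [pv_sum_count p hL hd]

-- ===== VERDICT =====
theorem solution_spec : Claim_equal_solution := by
  intro answers _
  unfold Spec_solution
  have hloop := pv_range_fold_enumerate (fun acc j v => pvStep acc j v) answers []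
    (PySem.Dict.mk [((1 : Int), (0 : Int)), (2, 0), (3, 0)])
  simp only [List.length_nil, Nat.cast_zero, zero_add, List.nil_append] at hloop
  have key : solution answers =
      (((PySem.List.pyRange 0 (answers.length : Int) 1).foldl
          (fun r a => pvStep r a (PySem.List.pyGetD answers a 0))
          (PySem.Dict.mk [(1, 0), (2, 0), (3, 0)])).items).foldl
        (fun acc kv =>
          if (PySem.List.max?
                (((PySem.List.pyRange 0 (answers.length : Int) 1).foldl
                  (fun r a => pvStep r a (PySem.List.pyGetD answers a 0))
                  (PySem.Dict.mk [(1, 0), (2, 0), (3, 0)])).values) (fun y => y)).getD 0 == kv.2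
          then acc ++ [kv.1] else acc) [] := rfl
  have c1 := pv_score_eq [1, 2, 3, 4, 5] (by norm_num) (by norm_num) answers
  have c2 := pv_score_eq [2, 1, 2, 3, 2, 4, 2, 5] (by norm_num) (by norm_num) answers
  have c3 := pv_score_eq [3, 3, 1, 1, 2, 2, 4, 4, 5, 5] (by norm_num) (by norm_num) answers
  have keyB : solution_alt answers =
      (PySem.List.pyRange 0 3 1).foldl
        (fun acc i => if PySem.List.pyGetD
            [((PySem.List.enumerate answers 0).countP (pvHit [1, 2, 3, 4, 5]) : Int),
             ((PySem.List.enumerate answers 0).countP (pvHit [2, 1, 2, 3, 2, 4, 2, 5]) : Int),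
             ((PySem.List.enumerate answers 0).countP (pvHit [3, 3, 1, 1, 2, 2, 4, 4, 5, 5]) : Int)] i 0
            == (PySem.List.max?
              [((PySem.List.enumerate answers 0).countP (pvHit [1, 2, 3, 4, 5]) : Int),
               ((PySem.List.enumerate answers 0).countP (pvHit [2, 1, 2, 3, 2, 4, 2, 5]) : Int),
               ((PySem.List.enumerate answers 0).countP (pvHit [3, 3, 1, 1, 2, 2, 4, 4, 5, 5]) : Int)] (fun y => y)).getD 0
          then acc ++ [i + 1] else acc) [] := by
    simp only [solution_alt, List.map_cons, List.map_nil]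
    simp only [c1, c2, c3]
  rw [key, keyB, hloop, pv_dict_fold]
  simp only [zero_add, PySem.Dict.values_mk]
  exact pv_select _ _ _ _
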